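-- pv_equiv track=rewrite | github.com/satty08/practice_problems_python | Day2.py | solve
-- ===== SOURCE A (Python) =====
-- def solve(row):
--     count = 0
--     i = 0
--     while i < len(row):
--         for j in range(i+1, len(row)):
--             if row[i] == row[j]:
--                 temp = row[j]
--                 row[j] = row[i+1]
--                 row[i+1] = temp
--                 count += 1
--                 break
--         i += 2
--     return count, row
-- ===== SOURCE B (Python) =====
-- def solve(row):
--     # Same return value as the original; like the original, mutates `row` in place.
--     count = 0
--     out = []
--     rest = list(row)
--     while len(rest) >= 2:
--         a, b = rest[0], rest[1]
--         t = rest[2:]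
--         if a == b:
--             count += 1
--             out.append(a)
--             out.append(b)
--         elif a in t:
--             t[t.index(a)] = b
--             count += 1
--             out.append(a)
--             out.append(a)
--         else:
--             out.append(a)
--             out.append(b)
--         rest = t
--     out.extend(rest)
--     row[:] = out
--     return count, row
-- ===== Notes on version B (the rewrite author's own statement) =====
-- stated objective: alternative
-- what changed: Replaces the index-stepping while loop with in-place swaps and an explicit inner scan-with-break by a single front-consuming loop that peels two elements per step, uses one built-in first-occurrence search (in / list.index) on the tail and writes the displaced partner there, building the output list forward.
import Mathlib
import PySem

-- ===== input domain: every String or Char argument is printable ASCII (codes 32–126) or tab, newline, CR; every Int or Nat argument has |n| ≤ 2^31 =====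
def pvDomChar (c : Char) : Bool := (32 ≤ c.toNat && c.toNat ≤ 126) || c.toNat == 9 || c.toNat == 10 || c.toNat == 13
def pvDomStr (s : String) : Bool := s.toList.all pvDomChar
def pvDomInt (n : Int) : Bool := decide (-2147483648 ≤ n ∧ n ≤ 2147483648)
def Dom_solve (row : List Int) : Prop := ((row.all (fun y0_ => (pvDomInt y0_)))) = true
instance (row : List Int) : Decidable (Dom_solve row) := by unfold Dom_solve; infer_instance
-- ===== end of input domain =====

-- B pairs elements by consuming the list two at a time instead of A's index-stepping swap loop; same value, same cost class.
-- Both Pythons mutate `row` in place identically; the equivalence proved here is about the return value.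

-- ===== PORT A =====
-- inner `for j in range(i+1, len(row)): if row[i] == row[j]: … break` (returns the j it broke at)
def pyFindJ (row : List Int) (i : Nat) (j : Nat) : Option Nat :=
  if _h : j < row.length then
    if row.getD j 0 = row.getD i 0 then some j else pyFindJ row i (j+1)
  else none
termination_by row.length - j

-- `while i < len(row): …; i += 2` with the in-place swap
def loopA (row : List Int) (count : Int) (i : Nat) : Int × List Int :=
  if _h : i < row.length then
    match pyFindJ row i (i+1) with
    | some j =>
        let temp := row.getD j 0
        let row1 := row.set j (row.getD (i+1) 0)
        let row2 := row1.set (i+1) temp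
        loopA row2 (count+1) (i+2)
    | none => loopA row count (i+2)
  else (count, row)
termination_by row.length - i
decreasing_by
  · simp only [List.length_set]; omega
  · omega

def solve (row : List Int) : Int × List Int := loopA row 0 0

-- ===== PORT B =====
-- `while len(rest) >= 2:` peel a, b; on a match write b at a's first position in the tail; append the pair to out.
def goB (count : Int) (out : List Int) (rest : List Int) : Int × List Int :=
  match rest with
  | a :: b :: t =>
    if a = b then goB (count+1) (out ++ [a, b]) t
    else if a ∈ t then
      goB (count+1) (out ++ [a, a]) (t.set ((PySem.List.index? t a).getD 0) b)
    else goB count (out ++ [a, b]) t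
  | _ => (count, out ++ rest)
termination_by rest.length
decreasing_by all_goals simp [List.length_set]

def solve_alt (row : List Int) : Int × List Int := goB 0 [] row

-- ===== PRECONDITION & SPEC =====
def Spec_solve (row : List Int) (out : Int × List Int) : Prop := out = solve_alt row
instance (row : List Int) (out : Int × List Int) : Decidable (Spec_solve row out) := by unfold Spec_solve; infer_instance

-- ===== CLAIM (what is proved, stated in full; the proofs are below) =====
def Claim_equal_solve : Prop := ∀ (row : List Int), Dom_solve row → Spec_solve row (solve row)

-- ===== LEMMAS AND PROOFS =====

lemma getD_append_right (out u : List Int) (k : Nat) :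
    (out ++ u).getD (out.length + k) 0 = u.getD k 0 := by
  simp [List.getD, List.getElem?_append_right]

lemma set_append_shift (out u : List Int) (k : Nat) (x : Int) :
    (out ++ u).set (out.length + k) x = out ++ u.set k x := by
  simp

lemma set_append_head (l t' : List Int) (x y : Int) :
    (l ++ x :: t').set l.length y = l ++ y :: t' := by
  simpa using set_append_shift l (x :: t') 0 y

-- A's inner scan starting at offset 1+d past position i finds exactly Python's `index` of a in the remaining tail.
lemma findJ_eq (out : List Int) (a : Int) (u : List Int) (d : Nat) :
    pyFindJ (out ++ a :: u) out.length (out.length + 1 + d)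
      = (PySem.List.index? (u.drop d) a).map (fun k => out.length + 1 + d + k) := by
  induction hn : u.length - d using Nat.strong_induction_on generalizing d with
  | _ n ih =>
  rw [pyFindJ]
  by_cases hd : d < u.length
  · have hlt : out.length + 1 + d < (out ++ a :: u).length := by simp; omega
    have hrowi : (out ++ a :: u).getD out.length 0 = a := by
      simpa using getD_append_right out (a :: u) 0
    have hrowj : (out ++ a :: u).getD (out.length + 1 + d) 0 = u.getD d 0 := by
      have h := getD_append_right out (a :: u) (1 + d)
      rw [← Nat.add_assoc] at h
      rw [h]
      have : 1 + d = d + 1 := by omega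
      rw [this, List.getD_cons_succ]
    have hget : u.getD d 0 = u[d] := by
      simp [List.getD, List.getElem?_eq_getElem hd]
    have hdrop : u.drop d = u[d] :: u.drop (d+1) := List.drop_eq_getElem_cons hd
    rw [dif_pos hlt, hrowi, hrowj]
    by_cases heq : u.getD d 0 = a
    · have hda : u[d] = a := by rw [← hget, heq]
      rw [if_pos heq, hdrop, hda, PySem.List.index?_cons_self]
      simp
    · have hne : u[d] ≠ a := fun h => heq (by rw [hget, h])
      rw [if_neg heq]
      have h2 : out.length + 1 + d + 1 = out.length + 1 + (d + 1) := by omega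
      rw [h2, ih (u.length - (d+1)) (by omega) (d+1) rfl]
      rw [hdrop, PySem.List.index?_cons_of_ne _ hne]
      cases PySem.List.index? (u.drop (d+1)) a <;> simp <;> omega
  · have hge : ¬ out.length + 1 + d < (out ++ a :: u).length := by simp; omega
    rw [dif_neg hge, List.drop_eq_nil_of_le (by omega)]
    simp [PySem.List.index?]

lemma key : ∀ (n : Nat) (rest out : List Int) (c : Int), rest.length ≤ n →
    loopA (out ++ rest) c out.length = goB c out rest := by
  intro n
  induction n with
  | zero =>
    intro rest out c hle
    have hnil : rest = [] := List.eq_nil_of_length_eq_zero (by omega)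
    subst hnil
    rw [loopA, goB] <;> simp
  | succ n ih =>
    intro rest out c hle
    match rest with
    | [] =>
      rw [loopA, goB] <;> simp
    | [a] =>
      rw [loopA, dif_pos (by simp)]
      have hfind : pyFindJ (out ++ [a]) out.length (out.length + 1) = none := by
        have h := findJ_eq out a [] 0
        simpa [PySem.List.index?] using h
      rw [hfind, loopA, dif_neg (by simp), goB] <;> simp
    | a :: b :: t =>
      have hle' : t.length ≤ n := by simp at hle; omega
      rw [loopA, dif_pos (by simp)]
      have hfind := findJ_eq out a (b :: t) 0
      simp only [Nat.add_zero, List.drop_zero] at hfind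
      rw [goB]
      by_cases hab : a = b
      · -- inner match at j = i+1, the swap is a no-op
        subst hab
        rw [PySem.List.index?_cons_self] at hfind
        simp only [Option.map_some, Nat.add_zero] at hfind
        rw [hfind]
        have hb : (out ++ a :: a :: t).getD (out.length + 1) 0 = a := by
          have h := getD_append_right out (a :: a :: t) 1
          simpa using h
        simp only [hb]
        rw [show (out ++ a :: a :: t) = (out ++ [a]) ++ a :: t by simp,
            show out.length + 1 = (out ++ [a]).length from by simp]
        rw [set_append_head, set_append_head]
        rw [show ((out ++ [a]) ++ a :: t) = (out ++ [a, a]) ++ t by simp,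
            show out.length + 2 = (out ++ [a, a]).length from by simp]
        rw [ih t (out ++ [a, a]) (c+1) hle']
        simp
      · rw [PySem.List.index?_cons_of_ne _ (Ne.symm hab)] at hfind
        by_cases hmem : a ∈ t
        · -- found at offset k in t: b is written at that spot, a copied to position i+1
          obtain ⟨k, hk⟩ := Option.isSome_iff_exists.1 ((PySem.List.index?_isSome_iff t a).2 hmem)
          obtain ⟨hklt, hkval, -⟩ := PySem.List.getElem_of_index?_eq_some hk
          rw [hk] at hfind
          simp only [Option.map_some] at hfind
          rw [hfind]
          have e1 : out.length + 1 + (k + 1) = out.length + (k + 2) := by omega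
          have htmp : (out ++ a :: b :: t).getD (out.length + (k + 2)) 0 = a := by
            rw [getD_append_right]
            have : (a :: b :: t).getD (k + 2) 0 = t.getD k 0 := by
              simp [List.getD_cons_succ]
            rw [this]
            simp [List.getD, List.getElem?_eq_getElem hklt, hkval]
          have hb1 : (out ++ a :: b :: t).getD (out.length + 1) 0 = b := by
            have h := getD_append_right out (a :: b :: t) 1
            simpa using h
          rw [e1]
          simp only [htmp, hb1]
          have hsetk : (out ++ a :: b :: t).set (out.length + (k + 2)) b
              = (out ++ [a]) ++ b :: t.set k b := by
            rw [set_append_shift out (a :: b :: t) (k + 2) b]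
            simp [List.set_cons_succ]
          rw [hsetk, show out.length + 1 = (out ++ [a]).length from by simp,
              set_append_head]
          rw [if_neg hab, if_pos hmem, hk]
          simp only [Option.getD_some]
          rw [show ((out ++ [a]) ++ a :: t.set k b) = (out ++ [a, a]) ++ t.set k b by simp]
          rw [show out.length + 2 = (out ++ [a, a]).length from by simp]
          exact ih (t.set k b) (out ++ [a, a]) (c+1) (by simpa using hle')
        · -- not found: the pair is left as it is
          have hnone : PySem.List.index? t a = none :=
            (PySem.List.index?_eq_none_iff t a).2 hmem
          rw [hnone] at hfind
          simp only [Option.map_none] at hfind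
          rw [hfind]
          rw [if_neg hab, if_neg hmem]
          rw [show (out ++ a :: b :: t) = (out ++ [a, b]) ++ t by simp,
              show out.length + 2 = (out ++ [a, b]).length by simp]
          exact ih t (out ++ [a, b]) c hle'

-- ===== VERDICT (by name: the statement is the Claim_ definition above) =====
theorem solve_spec : Claim_equal_solve := by
  intro row _
  unfold Spec_solve solve solve_alt
  have h := key row.length row [] 0 (le_refl _)
  simpa using h
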